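-- pv_equiv track=rewrite | github.com/spencer-p/aoc2024 | day02/day2.py | verify_report
-- ===== SOURCE A (Python) =====
-- def verify_report(report, allow_skip=False):
--     valid, _ = verify_report_r(report, allow_skip=False)
--     if valid:
--         return True
--     if allow_skip:
--         for i in range(len(report)):
--             subset = report.copy()
--             del subset[i]
--             valid, _ = verify_report_r(subset, allow_skip=False)
--             if valid:
--                 return True
--     return False
--
-- def verify_report_r(report, allow_skip=False) -> (bool, bool):
--     # Base case - one or zero numbers is always valid.
--     if len(report) < 2:
--         return True, None
--     if len(report) == 2 and allow_skip:
--         # If there's two and we can drop one, again it's the vacuous case.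
--         return True, None
--
--     # Compute the diff of the first two numbers
--     diff = report[1] - report[0]
--
--     # Check the rest.
--     rest_valid, increasing = verify_report_r(report[1:], allow_skip=allow_skip)
--     if not rest_valid:
--         if not allow_skip:
--             return False, None
--         else:
--             # Attempt to recover by dropping element 1.
--             # Note dropping 0 cannot recover.
--             return verify_report_r([report[0]]+report[2:], allow_skip=False)
--
--     # Figure out if we should be increasing or not.
--     if increasing is None:
--         increasing = True if diff > 0 else False
--
--     # Check if we broke the monotonic rule.
--     nonmono = (diff < 0 and increasing) or (diff > 0 and not increasing)
--     if nonmono: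
--         return False, None
--
--     # Check if the diff is too large.
--     diff = abs(diff)
--     if diff < 1 or diff > 3:
--         return False, None
--
--     return True, increasing
-- ===== SOURCE B (Python) =====
-- def verify_report(report, allow_skip=False):
--     def ok(xs, lo, hi):
--         return all(lo <= y - x <= hi for x, y in zip(xs, xs[1:]))
--     if ok(report, 1, 3) or ok(report, -3, -1):
--         return True
--     if not allow_skip:
--         return False
--     def dampened(lo, hi):
--         # first index whose diff breaks the rule; only removing it or its
--         # right neighbour can repair the report
--         for i in range(len(report) - 1):
--             if not (lo <= report[i + 1] - report[i] <= hi):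
--                 return (ok(report[:i] + report[i + 1:], lo, hi)
--                         or ok(report[:i + 1] + report[i + 2:], lo, hi))
--         return False
--     return dampened(1, 3) or dampened(-3, -1)
-- ===== Notes on version B (the rewrite author's own statement) =====
-- stated objective: faster
-- what changed: Replaces A's O(n^2)-per-check recursion with list slicing (repeated for every one-element removal) by a single linear scan of consecutive diffs per direction, and for the dampener only retries the two removals adjacent to the first out-of-range diff, since removing any other element leaves that bad pair adjacent.
import Mathlib
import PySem

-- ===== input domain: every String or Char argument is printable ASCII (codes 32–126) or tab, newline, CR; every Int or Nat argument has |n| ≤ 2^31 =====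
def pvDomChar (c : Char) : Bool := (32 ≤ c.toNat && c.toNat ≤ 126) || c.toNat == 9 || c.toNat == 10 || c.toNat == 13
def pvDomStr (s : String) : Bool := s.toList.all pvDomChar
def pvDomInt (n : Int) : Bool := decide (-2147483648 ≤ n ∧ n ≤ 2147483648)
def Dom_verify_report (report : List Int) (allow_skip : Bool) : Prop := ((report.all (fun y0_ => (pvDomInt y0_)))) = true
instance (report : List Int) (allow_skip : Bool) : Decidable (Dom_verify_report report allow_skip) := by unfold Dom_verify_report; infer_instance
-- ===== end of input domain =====

-- B replaces A's O(n^3) recursive check with one linear diff scan per direction,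
-- retrying only the two removals adjacent to the first broken diff (objective: faster).

-- ===== PORT A =====
-- literal port of verify_report_r (Python tuple (bool, None/bool) → Bool × Option Bool)
def verifyReportR : List Int → Bool → Bool × Option Bool
  | [], _ => (true, none)
  | [_], _ => (true, none)
  | a :: b :: rest, allow_skip =>
    if rest.length == 0 && allow_skip then (true, none)
    else
      let diff := b - a
      let r := verifyReportR (b :: rest) allow_skip
      if !r.1 then
        if !allow_skip then (false, none)
        else verifyReportR (a :: rest) false
      else
        let increasing := match r.2 with
          | none => decide (diff > 0)
          | some v => v
        let nonmono := (decide (diff < 0) && increasing) || (decide (diff > 0) && !increasing)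
        if nonmono then (false, none)
        else
          let adiff := |diff|
          if adiff < 1 || adiff > 3 then (false, none)
          else (true, some increasing)
termination_by xs _ => xs.length
decreasing_by all_goals simp

def verify_report (report : List Int) (allow_skip : Bool) : Bool :=
  if (verifyReportR report false).1 then true
  else if allow_skip then
    -- for i in range(len(report)): del subset[i]; early return on success
    (List.range report.length).any (fun i => (verifyReportR (report.eraseIdx i) false).1)
  else false

-- ===== PORT B =====
-- all(lo <= y - x <= hi for x, y in zip(xs, xs[1:]))
def pairsOk (lo hi : Int) (xs : List Int) : Bool :=
  (xs.zip xs.tail).all (fun p => decide (lo ≤ p.2 - p.1) && decide (p.2 - p.1 ≤ hi))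

-- the loop of `dampened`: index of the first diff out of range
def firstBad (lo hi : Int) : List Int → Option Nat
  | [] => none
  | [_] => none
  | a :: b :: rest =>
    if decide (lo ≤ b - a) && decide (b - a ≤ hi) then
      (firstBad lo hi (b :: rest)).map (· + 1)
    else some 0
termination_by xs => xs.length
decreasing_by simp

def dampened (lo hi : Int) (report : List Int) : Bool :=
  match firstBad lo hi report with
  | none => false
  | some i => pairsOk lo hi (report.eraseIdx i) || pairsOk lo hi (report.eraseIdx (i + 1))

def verify_report_alt (report : List Int) (allow_skip : Bool) : Bool :=
  if pairsOk 1 3 report || pairsOk (-3) (-1) report then true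
  else if !allow_skip then false
  else dampened 1 3 report || dampened (-3) (-1) report

-- ===== PRECONDITION & SPEC =====
def Spec_verify_report (report : List Int) (allow_skip : Bool) (out : Bool) : Prop := out = verify_report_alt report allow_skip
instance (report : List Int) (allow_skip : Bool) (out : Bool) : Decidable (Spec_verify_report report allow_skip out) := by unfold Spec_verify_report; infer_instance

-- ===== CLAIM (what is proved, stated in full; the proofs are below) =====
def Claim_equal_verify_report : Prop := ∀ (report : List Int) (allow_skip : Bool), Dom_verify_report report allow_skip → Spec_verify_report report allow_skip (verify_report report allow_skip)

-- ===== LEMMAS AND PROOFS =====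

theorem pairsOk_cons₂ (lo hi a b : Int) (t : List Int) :
    pairsOk lo hi (a :: b :: t) =
      ((decide (lo ≤ b - a) && decide (b - a ≤ hi)) && pairsOk lo hi (b :: t)) := by
  simp [pairsOk, Bool.and_assoc]

-- the two directions cannot both hold when there is at least one diff
theorem pairsOk_not_both (a b : Int) (t : List Int) :
    ¬(pairsOk 1 3 (a :: b :: t) = true ∧ pairsOk (-3) (-1) (a :: b :: t) = true) := by
  rintro ⟨h1, h2⟩
  rw [pairsOk_cons₂] at h1 h2
  simp at h1 h2
  omega

-- characterisation of A's recursive helper (always called with allow_skip = False)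
theorem rr_char (a b : Int) (t : List Int) :
    verifyReportR (a :: b :: t) false =
      if pairsOk 1 3 (a :: b :: t) then (true, some true)
      else if pairsOk (-3) (-1) (a :: b :: t) then (true, some false)
      else (false, none) := by
  induction t generalizing a b with
  | nil =>
    rw [verifyReportR]
    simp [verifyReportR, pairsOk]
    split_ifs <;> simp_all <;>
      (rcases abs_cases (b - a) with ⟨h1, h2⟩ | ⟨h1, h2⟩ <;> omega)
  | cons c t ih =>
    rw [verifyReportR]
    rw [ih b c]
    rw [pairsOk_cons₂ 1 3 a b, pairsOk_cons₂ (-3) (-1) a b]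
    by_cases h1 : pairsOk 1 3 (b :: c :: t) = true
    · have h2 : pairsOk (-3) (-1) (b :: c :: t) = false := by
        by_contra h
        exact pairsOk_not_both b c t ⟨h1, by revert h; cases pairsOk (-3) (-1) (b :: c :: t) <;> simp⟩
      simp [h1, h2]
      split_ifs <;> simp_all <;>
        (rcases abs_cases (b - a) with ⟨ha1, ha2⟩ | ⟨ha1, ha2⟩ <;> omega)
    · by_cases h2 : pairsOk (-3) (-1) (b :: c :: t) = true
      · simp [h1, h2]
        split_ifs <;> simp_all <;>
          (rcases abs_cases (b - a) with ⟨ha1, ha2⟩ | ⟨ha1, ha2⟩ <;> omega)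
      · simp [h1, h2]

theorem rr_fst (xs : List Int) :
    (verifyReportR xs false).1 = (pairsOk 1 3 xs || pairsOk (-3) (-1) xs) := by
  match xs with
  | [] => simp [verifyReportR, pairsOk]
  | [_] => simp [verifyReportR, pairsOk]
  | a :: b :: t =>
    rw [rr_char]
    split_ifs <;> simp_all

theorem firstBad_none (lo hi : Int) (xs : List Int) (h : firstBad lo hi xs = none) :
    pairsOk lo hi xs = true := by
  match xs with
  | [] => rfl
  | [_] => rfl
  | a :: b :: t =>
    rw [firstBad] at h
    rw [pairsOk_cons₂]
    split_ifs at h with hd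
    · simp only [Option.map_eq_none_iff] at h
      simp at hd
      simp [firstBad_none lo hi (b :: t) h]
      exact hd
termination_by xs.length

theorem firstBad_lt (lo hi : Int) (xs : List Int) (k : Nat) (h : firstBad lo hi xs = some k) :
    k + 1 < xs.length := by
  match xs with
  | [] => simp [firstBad] at h
  | [_] => simp [firstBad] at h
  | a :: b :: t =>
    rw [firstBad] at h
    split_ifs at h with hd
    · simp at h
      obtain ⟨k', hk', rfl⟩ := h
      have := firstBad_lt lo hi (b :: t) k' hk'
      simp at this ⊢; omega
    · simp at h
      simp [← h]
termination_by xs.length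

theorem pairsOk_cons_false (lo hi a : Int) (ys : List Int) (h : pairsOk lo hi ys = false) :
    pairsOk lo hi (a :: ys) = false := by
  match ys with
  | [] => simp [pairsOk] at h
  | b :: t => rw [pairsOk_cons₂]; simp [h]

theorem firstBad_pairsOk_false (lo hi : Int) (xs : List Int) (k : Nat)
    (h : firstBad lo hi xs = some k) : pairsOk lo hi xs = false := by
  match xs with
  | [] => simp [firstBad] at h
  | [_] => simp [firstBad] at h
  | a :: b :: t =>
    rw [firstBad] at h
    rw [pairsOk_cons₂]
    split_ifs at h with hd
    · simp at h
      obtain ⟨k', hk', rfl⟩ := h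
      simp [firstBad_pairsOk_false lo hi (b :: t) k' hk']
    · simp_all
termination_by xs.length

-- removing any index other than the first bad one or its right neighbour cannot help
theorem erase_other_false (lo hi : Int) (xs : List Int) (k i : Nat)
    (h : firstBad lo hi xs = some k) (hik : i ≠ k) (hik1 : i ≠ k + 1) :
    pairsOk lo hi (xs.eraseIdx i) = false := by
  match xs with
  | [] => simp [firstBad] at h
  | [_] => simp [firstBad] at h
  | a :: b :: t =>
    rw [firstBad] at h
    split_ifs at h with hd
    · -- head diff ok, k = k' + 1
      simp at h
      obtain ⟨k', hk', rfl⟩ := h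
      match i with
      | 0 =>
        simp [List.eraseIdx]
        exact firstBad_pairsOk_false lo hi (b :: t) k' hk'
      | i' + 1 =>
        have : (a :: b :: t).eraseIdx (i' + 1) = a :: (b :: t).eraseIdx i' := rfl
        rw [this]
        exact pairsOk_cons_false lo hi a _
          (erase_other_false lo hi (b :: t) k' i' hk' (by omega) (by omega))
    · -- head diff bad, k = 0; i ≥ 2, so the bad pair survives
      simp at h
      subst h
      match i, hik, hik1 with
      | i' + 2, _, _ =>
        have : (a :: b :: t).eraseIdx (i' + 2) = a :: b :: t.eraseIdx i' := rfl
        rw [this, pairsOk_cons₂]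
        simp_all
termination_by xs.length

theorem any_iff_dampened (lo hi : Int) (xs : List Int) (hbad : pairsOk lo hi xs = false) :
    ((List.range xs.length).any (fun i => pairsOk lo hi (xs.eraseIdx i)))
      = dampened lo hi xs := by
  cases hfb : firstBad lo hi xs with
  | none => exact absurd (firstBad_none lo hi xs hfb) (by simp [hbad])
  | some k =>
    have hd : dampened lo hi xs
        = (pairsOk lo hi (xs.eraseIdx k) || pairsOk lo hi (xs.eraseIdx (k + 1))) := by
      simp [dampened, hfb]
    rw [hd]
    have hk := firstBad_lt lo hi xs k hfb
    cases hres : (pairsOk lo hi (xs.eraseIdx k) || pairsOk lo hi (xs.eraseIdx (k + 1))) with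
    | true =>
      rw [List.any_eq_true]
      simp only [List.mem_range]
      simp at hres
      rcases hres with h | h
      · exact ⟨k, by omega, h⟩
      · exact ⟨k + 1, by omega, h⟩
    | false =>
      rw [List.any_eq_false]
      simp at hres
      intro i hmem
      simp only [Bool.not_eq_true]
      by_cases hik : i = k
      · simp [hik, hres.1]
      · by_cases hik1 : i = k + 1
        · simp [hik1, hres.2]
        · simp [erase_other_false lo hi xs k i hfb hik hik1]

-- ===== VERDICT (by name: the statement is the Claim_ definition above) =====
theorem verify_report_spec : Claim_equal_verify_report := by
  intro report allow_skip _
  unfold Spec_verify_report verify_report verify_report_alt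
  rw [rr_fst]
  by_cases hs : (pairsOk 1 3 report || pairsOk (-3) (-1) report) = true
  · simp [hs]
  · simp only [Bool.or_eq_true, not_or, Bool.not_eq_true] at hs
    obtain ⟨h1, h2⟩ := hs
    cases allow_skip with
    | false => simp [h1, h2]
    | true =>
      have key : ((List.range report.length).any
          (fun i => (verifyReportR (report.eraseIdx i) false).1))
          = (dampened 1 3 report || dampened (-3) (-1) report) := by
        rw [← any_iff_dampened 1 3 report h1, ← any_iff_dampened (-3) (-1) report h2]
        rw [Bool.eq_iff_iff]
        simp only [List.any_eq_true, List.mem_range, rr_fst, Bool.or_eq_true]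
        constructor
        · rintro ⟨i, hi, h | h⟩
          exacts [Or.inl ⟨i, hi, h⟩, Or.inr ⟨i, hi, h⟩]
        · rintro (⟨i, hi, h⟩ | ⟨i, hi, h⟩)
          exacts [⟨i, hi, Or.inl h⟩, ⟨i, hi, Or.inr h⟩]
      simp [h1, h2, key]
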